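-- pv_equiv track=rewrite | github.com/HypnosRin/SFE-Net | codes/utils/universal_util.py | scan_pos
-- ===== SOURCE A (Python) =====
-- def scan_pos(H, W, h, w, s=2):
--     """
--     scan big picture (H, W) with small picture (h, w)
--     :param H:
--     :param W:
--     :param h:
--     :param w:
--     :param s:
--     :return:
--     """
--     assert H >= h and W >= w
--     assert h % s == 0 and w % s == 0
--     y, x = 0, 0
--     ys, xs = [], []
--     positions = []
--     while True:
--         ys.append(y)
--         if y + h >= H:
--             ys[-1] = H - h
--             break
--         y += (h // s)
--     while True:
--         xs.append(x)
--         if x + w >= W: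
--             xs[-1] = W - w
--             break
--         x += (w // s)
--     for y in ys:
--         for x in xs:
--             positions.append((y, x))
--     return positions
-- ===== SOURCE B (Python) =====
-- def scan_pos(H, W, h, w, s=2):
--     """Closed-form scan positions: arithmetic sequence per axis, then Cartesian product."""
--     assert H >= h and W >= w
--     assert h % s == 0 and w % s == 0
--
--     def axis(total, win):
--         step = win // s
--         t = total - win
--         k = 0 if t == 0 else -(-t // step)  # ceil(t / step)
--         return [i * step for i in range(k)] + [t]
--
--     ys = axis(H, h)
--     xs = axis(W, w)
--     return [(y, x) for y in ys for x in xs]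
-- ===== Notes on version B (the rewrite author's own statement) =====
-- stated objective: simpler
-- what changed: Replaces A's two increment-and-break while loops by a closed-form arithmetic sequence per axis (ceil-division count plus clamped final offset) and the nested append loop by a Cartesian-product comprehension.
import Mathlib
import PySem

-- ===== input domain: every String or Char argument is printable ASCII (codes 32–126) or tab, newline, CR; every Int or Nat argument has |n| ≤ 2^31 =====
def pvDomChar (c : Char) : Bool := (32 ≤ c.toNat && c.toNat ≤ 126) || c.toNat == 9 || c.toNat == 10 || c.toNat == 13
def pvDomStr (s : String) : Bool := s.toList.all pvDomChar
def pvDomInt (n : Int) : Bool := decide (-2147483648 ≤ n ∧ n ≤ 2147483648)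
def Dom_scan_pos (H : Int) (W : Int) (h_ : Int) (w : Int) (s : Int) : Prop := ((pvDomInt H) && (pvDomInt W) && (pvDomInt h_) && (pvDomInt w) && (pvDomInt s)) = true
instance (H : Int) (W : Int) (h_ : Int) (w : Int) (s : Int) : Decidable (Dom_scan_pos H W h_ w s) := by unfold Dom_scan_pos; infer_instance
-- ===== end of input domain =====

-- B replaces A's increment-and-break while loops by closed-form arithmetic sequences
-- (ceil-division count, clamped last element) and the nested append loop by a
-- Cartesian-product comprehension; objective: simpler.

-- ===== PORT A =====
-- one while loop of A: append y; if y + h >= H replace last with H - h and stop, else y += h // s.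
-- fuel only makes the same computation total; under Pre_ it never runs out.
def scanAxisA : Nat → Int → Int → Int → Int → List Int → List Int
  | 0, _, _, _, _, acc => acc
  | f+1, y, hh, HH, s, acc =>
    if HH ≤ y + hh then acc ++ [HH - hh]
    else scanAxisA f (y + PySem.Int.floordiv hh s) hh HH s (acc ++ [y])

def scan_pos (H : Int) (W : Int) (h_ : Int) (w : Int) (s : Int) : List (Int × Int) :=
  let ys := scanAxisA ((H - h_).toNat + 1) 0 h_ H s []
  let xs := scanAxisA ((W - w).toNat + 1) 0 w W s []
  ys.foldl (fun ps y => xs.foldl (fun ps x => ps ++ [(y, x)]) ps) []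

-- ===== PORT B =====
def axisAlt (total : Int) (win : Int) (s : Int) : List Int :=
  let step := PySem.Int.floordiv win s
  let t := total - win
  let k : Int := if t = 0 then 0 else -(PySem.Int.floordiv (-t) step)
  (PySem.List.pyRange 0 k 1).map (fun i => i * step) ++ [t]

def scan_pos_alt (H : Int) (W : Int) (h_ : Int) (w : Int) (s : Int) : List (Int × Int) :=
  let ys := axisAlt H h_ s
  let xs := axisAlt W w s
  ys.flatMap (fun y => xs.map (fun x => (y, x)))

-- ===== PRECONDITION & SPEC =====
-- Pre_: exactly where Python A returns: both asserts pass (with s ≠ 0, else '%' raises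
-- ZeroDivisionError), and each while loop terminates (positive step, or an immediate break
-- because the window already covers the axis); otherwise A raises or loops forever.
def Pre_scan_pos (H : Int) (W : Int) (h_ : Int) (w : Int) (s : Int) : Prop :=
  h_ ≤ H ∧ w ≤ W ∧ s ≠ 0 ∧ PySem.Int.mod h_ s = 0 ∧ PySem.Int.mod w s = 0 ∧
  (H = h_ ∨ 0 < PySem.Int.floordiv h_ s) ∧ (W = w ∨ 0 < PySem.Int.floordiv w s)
instance (H : Int) (W : Int) (h_ : Int) (w : Int) (s : Int) : Decidable (Pre_scan_pos H W h_ w s) := by unfold Pre_scan_pos; infer_instance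

def pvWitness_scan_pos : Int × Int × Int × Int × Int := (10, 8, 4, 4, 2)

def Spec_scan_pos (H : Int) (W : Int) (h_ : Int) (w : Int) (s : Int) (out : List (Int × Int)) : Prop := out = scan_pos_alt H W h_ w s
instance (H : Int) (W : Int) (h_ : Int) (w : Int) (s : Int) (out : List (Int × Int)) : Decidable (Spec_scan_pos H W h_ w s out) := by unfold Spec_scan_pos; infer_instance

-- ===== CLAIM (what is proved, stated in full; the proofs are below) =====
def Claim_equal_scan_pos : Prop := ∀ (H : Int) (W : Int) (h_ : Int) (w : Int) (s : Int), Dom_scan_pos H W h_ w s → Pre_scan_pos H W h_ w s → Spec_scan_pos H W h_ w s (scan_pos H W h_ w s)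

-- ===== LEMMAS AND PROOFS =====

-- ceiling count helper (proof-side only): number of multiples of step in [0, d)
def ceilc (d : Int) (step : Int) : Int := if d ≤ 0 then 0 else -(PySem.Int.floordiv (-d) step)

lemma ceilc_nonneg (d step : Int) (hstep : 0 < step) : 0 ≤ ceilc d step := by
  unfold ceilc
  split_ifs with h
  · omega
  · have h2 := (PySem.Int.neg_floordiv_neg_eq_iff_of_pos (a := d) (b := step)
      (q := -(PySem.Int.floordiv (-d) step)) hstep).mp rfl
    nlinarith [h2.1, h2.2]

lemma ceilc_succ (d step : Int) (hstep : 0 < step) (hd : 0 < d) :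
    ceilc d step = ceilc (d - step) step + 1 := by
  unfold ceilc
  by_cases hle : d - step ≤ 0
  · simp only [if_neg (by omega : ¬ d ≤ 0), if_pos hle]
    exact (PySem.Int.neg_floordiv_neg_eq_iff_of_pos hstep).mpr (by constructor <;> nlinarith)
  · simp only [if_neg (by omega : ¬ d ≤ 0), if_neg hle]
    rw [PySem.Int.floordiv_eq_ediv_of_pos hstep, PySem.Int.floordiv_eq_ediv_of_pos hstep]
    have : (-d) = (-(d - step)) + (-1) * step := by ring
    rw [this, Int.add_mul_ediv_right _ _ (by omega : step ≠ 0)]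
    ring

lemma scanAxisA_eq (hh HH s : Int) (hstep : 0 < PySem.Int.floordiv hh s) :
    ∀ (f : Nat) (y : Int) (acc : List Int), (HH - hh - y).toNat < f →
    scanAxisA f y hh HH s acc =
      acc ++ (PySem.List.pyRange 0 (ceilc (HH - hh - y) (PySem.Int.floordiv hh s)) 1).map
        (fun i => y + i * PySem.Int.floordiv hh s) ++ [HH - hh] := by
  intro f
  set step := PySem.Int.floordiv hh s with hstepdef
  induction f with
  | zero => intro y acc hf; omega
  | succ f ih =>
    intro y acc hf
    by_cases hbr : HH ≤ y + hh
    · have hd : HH - hh - y ≤ 0 := by omega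
      simp [scanAxisA, hbr, ceilc, hd]
    · have hd : 0 < HH - hh - y := by omega
      have hf' : (HH - hh - (y + step)).toNat < f := by
        rw [hstepdef] at hstep ⊢; omega
      simp only [scanAxisA, if_neg hbr, ← hstepdef]
      rw [ih (y + step) (acc ++ [y]) hf']
      have hc : ceilc (HH - hh - y) step = ceilc (HH - hh - (y + step)) step + 1 := by
        have := ceilc_succ (HH - hh - y) step hstep hd
        rw [this]; ring_nf
      rw [hc]
      have hc0 : 0 ≤ ceilc (HH - hh - (y + step)) step := ceilc_nonneg _ _ hstep
      conv_rhs => rw [PySem.List.pyRange_one_cons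
        (show (0:Int) < ceilc (HH - hh - (y + step)) step + 1 by omega), List.map_cons]
      have hmap : (PySem.List.pyRange (0 + 1) (ceilc (HH - hh - (y + step)) step + 1) 1).map
            (fun i => y + i * step)
          = (PySem.List.pyRange 0 (ceilc (HH - hh - (y + step)) step) 1).map
            (fun i => y + step + i * step) := by
        rw [PySem.List.pyRange_one, PySem.List.pyRange_one]
        have ht : (ceilc (HH - hh - (y + step)) step + 1 - (0 + 1)).toNat
            = (ceilc (HH - hh - (y + step)) step - 0).toNat := by omega
        rw [ht]
        simp only [List.map_map]
        apply List.map_congr_left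
        intro a _
        simp only [Function.comp_apply]
        push_cast
        ring
      rw [hmap]
      simp

lemma axis_eq (HH hh s : Int) (hle : hh ≤ HH)
    (hterm : HH = hh ∨ 0 < PySem.Int.floordiv hh s) :
    scanAxisA ((HH - hh).toNat + 1) 0 hh HH s [] = axisAlt HH hh s := by
  rcases hterm with heq | hstep
  · subst heq
    simp [scanAxisA, axisAlt]
  · rw [scanAxisA_eq hh HH s hstep ((HH - hh).toNat + 1) 0 [] (by omega)]
    unfold axisAlt ceilc
    simp only [sub_zero, List.nil_append]
    congr 1
    have : (HH - hh ≤ 0) = (HH - hh = 0) := by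
      apply propext; constructor <;> intro h <;> omega
    by_cases h0 : HH - hh = 0
    · simp [h0]
    · simp only [if_neg (by omega : ¬ HH - hh ≤ 0), if_neg h0]
      apply List.map_congr_left
      intro a _
      ring

lemma prod_eq (ys xs : List Int) :
    ys.foldl (fun ps y => xs.foldl (fun ps x => ps ++ [(y, x)]) ps) [] =
      ys.flatMap (fun y => xs.map (fun x => (y, x))) := by
  simp only [PySem.List.foldl_append_singleton_eq_map]
  rw [PySem.List.foldl_append_eq_flatMap]
  simp

-- ===== VERDICT (by name: the statement is the Claim_ definition above) =====
theorem scan_pos_spec : Claim_equal_scan_pos := by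
  intro H W h_ w s _hdom hpre
  obtain ⟨h1, h2, _, _, _, ht1, ht2⟩ := hpre
  unfold Spec_scan_pos scan_pos scan_pos_alt
  rw [axis_eq H h_ s h1 ht1, axis_eq W w s h2 ht2]
  exact prod_eq _ _
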